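-- pv_equiv track=rewrite | github.com/ndmccarthy/MSDS_Coursework | Data_Structures_and_Algorithms/makespan_scheduling.py | compute_makespan
-- ===== SOURCE A (Python) =====
-- def compute_makespan(times=list, processors=int, assignments=list):
--     # returns the maximum makespan of a processor
--     makespan = 0
--     for processor in range(processors):
--         temp_makespan = 0
--         for task in range(len(assignments)):
--             assigned_proc = assignments[task]
--             if assigned_proc == processor:
--                 temp_makespan += times[task]
--         if temp_makespan > makespan:
--             makespan = temp_makespan
--     return makespan
-- ===== SOURCE B (Python) =====
-- def compute_makespan(times=list, processors=int, assignments=list):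
--     # one pass over the tasks accumulating per-processor loads, then a max
--     loads = {}
--     for task, proc in enumerate(assignments):
--         if 0 <= proc < processors:
--             loads[proc] = loads.get(proc, 0) + times[task]
--     return max(list(loads.values()) + [0])
-- ===== Notes on version B (the rewrite author's own statement) =====
-- stated objective: faster
-- what changed: Replaced the per-processor rescans of the whole assignment list by a single pass that accumulates each processor's load in a dict, then takes the max of the loads and 0.
import Mathlib
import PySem

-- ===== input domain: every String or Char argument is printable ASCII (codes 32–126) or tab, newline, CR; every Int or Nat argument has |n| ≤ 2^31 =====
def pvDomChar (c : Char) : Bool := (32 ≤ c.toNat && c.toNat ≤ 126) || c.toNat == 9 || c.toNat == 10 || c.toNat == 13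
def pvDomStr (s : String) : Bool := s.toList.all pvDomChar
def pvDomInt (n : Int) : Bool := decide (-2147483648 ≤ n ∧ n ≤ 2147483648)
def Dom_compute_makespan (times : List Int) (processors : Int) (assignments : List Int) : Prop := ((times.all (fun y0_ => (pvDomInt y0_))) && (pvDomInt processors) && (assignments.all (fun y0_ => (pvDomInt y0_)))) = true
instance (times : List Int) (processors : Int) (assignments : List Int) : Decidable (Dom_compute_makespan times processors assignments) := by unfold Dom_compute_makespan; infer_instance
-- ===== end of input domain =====

-- B replaces A's per-processor rescans of the assignment list by one accumulating pass
-- into a per-processor load dict followed by a single max (objective: faster).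


-- ===== PORT A =====
-- times[task] is reached only for a task whose assignment matched a processor in
-- range(processors); Pre_ excludes the IndexError inputs, so pyGetD … 0 is exact there
def compute_makespan (times : List Int) (processors : Int) (assignments : List Int) : Int :=
  (PySem.List.pyRange 0 processors 1).foldl
    (fun makespan processor =>
      let temp :=
        (PySem.List.pyRange 0 (PySem.List.len assignments) 1).foldl
          (fun temp task =>
            if PySem.List.pyGetD assignments task 0 == processor then
              temp + PySem.List.pyGetD times task 0
            else temp)
          0
      if temp > makespan then temp else makespan)
    0


-- ===== PORT B =====
-- port of Source B: one fold over enumerate(assignments) into a PySem.Dict, then max(values + [0])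

def compute_makespan_alt (times : List Int) (processors : Int) (assignments : List Int) : Int :=
  let loads : PySem.Dict Int Int :=
    (PySem.List.enumerate assignments).foldl
      (fun d q =>
        if 0 ≤ q.2 ∧ q.2 < processors then
          d.insert q.2 (d.getD q.2 0 + PySem.List.pyGetD times q.1 0)
        else d)
      PySem.Dict.empty
  (PySem.List.max? (loads.values ++ [0]) (fun x => x)).getD 0


-- ===== PRECONDITION & SPEC =====
-- Pre_ excludes exactly the inputs on which Python A raises IndexError: a task whose
-- assignment lies in range(processors) but whose index has no entry in times.
def Pre_compute_makespan (times : List Int) (processors : Int) (assignments : List Int) : Prop :=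
  ∀ q ∈ PySem.List.enumerate assignments, (0 ≤ q.2 ∧ q.2 < processors) → q.1 < (times.length : Int)
instance (times : List Int) (processors : Int) (assignments : List Int) : Decidable (Pre_compute_makespan times processors assignments) := by unfold Pre_compute_makespan; infer_instance

def pvWitness_compute_makespan : List Int × Int × List Int := ([3, 1, 2], 2, [0, 1, 0])

def Spec_compute_makespan (times : List Int) (processors : Int) (assignments : List Int) (out : Int) : Prop := out = compute_makespan_alt times processors assignments
instance (times : List Int) (processors : Int) (assignments : List Int) (out : Int) : Decidable (Spec_compute_makespan times processors assignments out) := by unfold Spec_compute_makespan; infer_instance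

-- ===== CLAIM (what is proved, stated in full; the proofs are below) =====
def Claim_equal_compute_makespan : Prop := ∀ (times : List Int) (processors : Int) (assignments : List Int), Dom_compute_makespan times processors assignments → Pre_compute_makespan times processors assignments → Spec_compute_makespan times processors assignments (compute_makespan times processors assignments)

-- ===== LEMMAS AND PROOFS =====
-- generic: max over list vs 0
theorem pvM_congr (l1 l2 : List Int)
    (h1 : ∀ x ∈ l1, x ∈ l2 ∨ x = 0) (h2 : ∀ x ∈ l2, x ∈ l1 ∨ x = 0) :
    l1.foldl max 0 = l2.foldl max 0 := by
  apply le_antisymm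
  · rcases PySem.List.foldl_max_mem l1 0 with h | h
    · rw [h]; exact (PySem.List.le_foldl_max l2 0).1
    · rcases h1 _ h with hm | hm
      · exact (PySem.List.le_foldl_max l2 0).2 _ hm
      · rw [hm]; exact (PySem.List.le_foldl_max l2 0).1
  · rcases PySem.List.foldl_max_mem l2 0 with h | h
    · rw [h]; exact (PySem.List.le_foldl_max l1 0).1
    · rcases h2 _ h with hm | hm
      · exact (PySem.List.le_foldl_max l1 0).2 _ hm
      · rw [hm]; exact (PySem.List.le_foldl_max l1 0).1

theorem pvMax_append_zero (l : List Int) :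
    (PySem.List.max? (l ++ [0]) (fun x => x)).getD 0 = l.foldl max 0 := by
  cases l with
  | nil => simp [PySem.List.max?]
  | cons v vs =>
    rw [List.cons_append, PySem.List.max?_id_cons]
    -- (vs++[0]).foldl max v = (v::vs).foldl max 0
    show (vs ++ [0]).foldl max v = (v :: vs).foldl max 0
    rw [List.foldl_append, List.foldl_cons]
    simp only [List.foldl_cons, List.foldl_nil]
    have : ∀ (t : List Int) (a b : Int), t.foldl max (max a b) = max b (t.foldl max a) := by
      intro t
      induction t with
      | nil => intro a b; simp [max_comm]
      | cons x xs ih =>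
        intro a b
        simp only [List.foldl_cons]
        rw [show max (max a b) x = max (max a x) b by
          rw [max_assoc, max_comm b x, ← max_assoc], ih]
    rw [max_comm (List.foldl max v vs) 0, ← this vs v 0, max_comm v (0:Int)]

def pvLoad (times assignments : List Int) (p : Int) : Int :=
  (((PySem.List.enumerate assignments).filter (fun q => q.2 == p)).map
    (fun q => PySem.List.pyGetD times q.1 0)).sum

theorem pvGetD_fold (times : List Int) (L : List (Int × Int)) (d : PySem.Dict Int Int) (p : Int) :
    (L.foldl (fun d q => d.insert q.2 (d.getD q.2 0 + PySem.List.pyGetD times q.1 0)) d).getD p 0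
      = d.getD p 0 + ((L.filter (fun q => q.2 == p)).map (fun q => PySem.List.pyGetD times q.1 0)).sum := by
  induction L generalizing d with
  | nil => simp
  | cons q L ih =>
    simp only [List.foldl_cons, ih, List.filter_cons]
    by_cases h : q.2 = p
    · simp [h]
      omega
    · simp [PySem.Dict.getD_insert, h, Ne.symm h]

theorem pvInner_eq (times assignments : List Int) (p : Int) :
    (PySem.List.pyRange 0 (PySem.List.len assignments) 1).foldl
      (fun t task => if PySem.List.pyGetD assignments task 0 == p then
          t + PySem.List.pyGetD times task 0 else t) 0
    = pvLoad times assignments p := by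
  unfold pvLoad
  rw [PySem.List.enumerate_eq_map_pyRange (d := 0), PySem.List.len_eq]
  rw [List.filter_map, List.map_map]
  rw [PySem.List.foldl_if_eq_foldl_filter
    (p := fun task => PySem.List.pyGetD assignments task 0 == p)
    (f := fun t task => t + PySem.List.pyGetD times task 0)]
  rw [PySem.List.foldl_add]
  simp [Function.comp_def]

theorem pvA_eq (times : List Int) (processors : Int) (assignments : List Int) :
    compute_makespan times processors assignments
      = ((PySem.List.pyRange 0 processors 1).map (pvLoad times assignments)).foldl max 0 := by
  unfold compute_makespan
  rw [List.foldl_map]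
  apply PySem.List.foldl_congr_mem
  intro m p _
  simp only [pvInner_eq]
  by_cases h : pvLoad times assignments p > m
  · simp [h, max_eq_right (le_of_lt h)]
  · simp [h]
    omega

theorem pvB_eq (times : List Int) (processors : Int) (assignments : List Int) :
    compute_makespan_alt times processors assignments
      = (((PySem.Set.ofList (((PySem.List.enumerate assignments).filter
            (fun q => decide (0 ≤ q.2 ∧ q.2 < processors))).map (fun q => q.2))).map
          (pvLoad times assignments)).foldl max 0) := by
  unfold compute_makespan_alt
  rw [PySem.List.foldl_ite_eq_foldl_filter]
  rw [pvMax_append_zero]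
  have hkeys : ((((PySem.List.enumerate assignments).filter
        (fun q => decide (0 ≤ q.2 ∧ q.2 < processors))).foldl
        (fun d q => d.insert q.2 (d.getD q.2 0 + PySem.List.pyGetD times q.1 0))
        PySem.Dict.empty).keys)
      = PySem.Set.ofList (((PySem.List.enumerate assignments).filter
            (fun q => decide (0 ≤ q.2 ∧ q.2 < processors))).map (fun q => q.2)) := by
    rw [PySem.Dict.keys_foldl_insert_key]
    simp [PySem.Set.update, PySem.Set.ofList_eq_foldl]
  have hnodup := PySem.Dict.nodup_keys_foldl_insert_key
      ((PySem.List.enumerate assignments).filter (fun q => decide (0 ≤ q.2 ∧ q.2 < processors)))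
      (fun q => q.2)
      (fun d q => d.getD q.2 0 + PySem.List.pyGetD times q.1 0)
      PySem.Dict.empty (by simp)
  rw [PySem.Dict.values_eq_map_keys _ hnodup 0]
  rw [hkeys]
  apply congrArg (fun l => List.foldl max 0 l)
  apply List.map_congr_left
  intro k hk
  rw [pvGetD_fold]
  have hkin : (0 ≤ k ∧ k < processors) := by
    rw [PySem.Set.mem_ofList] at hk
    rcases List.mem_map.mp hk with ⟨q, hq, rfl⟩
    have := (List.mem_filter.mp hq).2
    simpa using this
  rw [List.filter_filter]
  rw [PySem.Dict.getD_empty, zero_add]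
  unfold pvLoad
  congr 1
  apply congrArg
  apply List.filter_congr
  intro q hq
  by_cases h : q.2 = k
  · subst h
    simp [hkin.1, hkin.2]
  · simp [h]

theorem pvAB (times : List Int) (processors : Int) (assignments : List Int) :
    compute_makespan times processors assignments
      = compute_makespan_alt times processors assignments := by
  rw [pvA_eq, pvB_eq]
  apply pvM_congr
  · intro x hx
    rcases List.mem_map.mp hx with ⟨p, hp, rfl⟩
    have hrange := (PySem.List.mem_pyRange_one).mp hp
    by_cases hmem : p ∈ PySem.Set.ofList (((PySem.List.enumerate assignments).filter
        (fun q => decide (0 ≤ q.2 ∧ q.2 < processors))).map (fun q => q.2))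
    · exact Or.inl (List.mem_map_of_mem hmem)
    · right
      unfold pvLoad
      have hnil : (PySem.List.enumerate assignments).filter (fun q => q.2 == p) = [] := by
        apply List.filter_eq_nil_iff.mpr
        intro q hq hbeq
        have hqp : q.2 = p := by simpa using hbeq
        apply hmem
        rw [PySem.Set.mem_ofList]
        apply List.mem_map.mpr
        refine ⟨q, List.mem_filter.mpr ⟨hq, ?_⟩, hqp⟩
        simp [hqp, hrange.1, hrange.2]
      rw [hnil]
      simp
  · intro x hx
    rcases List.mem_map.mp hx with ⟨k, hk, rfl⟩
    left
    apply List.mem_map_of_mem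
    rw [PySem.Set.mem_ofList] at hk
    rcases List.mem_map.mp hk with ⟨q, hq, rfl⟩
    have := (List.mem_filter.mp hq).2
    rw [PySem.List.mem_pyRange_one]
    have h2 : 0 ≤ q.2 ∧ q.2 < processors := by simpa using this
    exact h2

-- ===== VERDICT (by name: the statement is the Claim_ definition above) =====
theorem compute_makespan_spec : Claim_equal_compute_makespan := by
  intro times processors assignments _ _
  unfold Spec_compute_makespan
  exact pvAB times processors assignments
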